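-- pv_equiv track=rewrite | github.com/AndersAskeland/Programming | Python/code_wards/color.py | update
-- ===== SOURCE A (Python) =====
-- def update(row):
--     new_row = ""
--     for i in range(0, 4):
--
--         # B/G
--         if (row[i] == "B" and row[i+1] =="G") or (row[i+1] == "B" and row[i] == "G"):
--             new_row += "R"
--
--         # R/G
--         elif (row[i] == "R" and row[i+1] == "G") or (row[i+1] == "R" and row[i] == "G"):
--             new_row += "B"
--
--
--         # B/R
--         elif (row[i] == "B" and row[i+1] == "R") or (row[i+1] == "B" and row[i] == "R"):
--             new_row += "G"
--
--         # Identical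
--         else:
--             new_row += row[i]
--
--     # Return
--     return(new_row)
-- ===== SOURCE B (Python) =====
-- def update(row):
--     combine = {("B", "G"): "R", ("G", "B"): "R",
--                ("R", "G"): "B", ("G", "R"): "B",
--                ("B", "R"): "G", ("R", "B"): "G"}
--
--     def go(i):
--         if i == 4:
--             return ""
--         return combine.get((row[i], row[i + 1]), row[i]) + go(i + 1)
--
--     return go(0)
-- ===== Notes on version B (the rewrite author's own statement) =====
-- stated objective: alternative
-- what changed: Replaces the iterative branch-cascade with string accumulation by a recursive descent over the positions that combines each adjacent pair through a precomputed pair-to-color lookup table (defaulting to the left character), concatenating the result back-to-front.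
import Mathlib
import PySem

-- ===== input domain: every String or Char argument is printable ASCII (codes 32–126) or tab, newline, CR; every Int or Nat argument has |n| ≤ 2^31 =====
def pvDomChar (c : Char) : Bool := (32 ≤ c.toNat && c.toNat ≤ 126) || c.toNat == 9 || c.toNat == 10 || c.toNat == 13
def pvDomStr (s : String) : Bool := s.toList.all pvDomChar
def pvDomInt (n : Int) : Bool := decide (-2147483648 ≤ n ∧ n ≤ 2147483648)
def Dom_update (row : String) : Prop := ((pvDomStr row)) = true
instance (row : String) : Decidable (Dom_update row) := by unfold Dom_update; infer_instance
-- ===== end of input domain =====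

-- B replaces A's iterative branch cascade by a recursive descent that combines each adjacent
-- pair through a precomputed pair→color lookup table; objective: alternative (same cost).

-- ===== PORT A =====
-- row[i] / row[i+1]: IndexError (row shorter than 5) is excluded by Pre_update, so pyGetD's default is never read.
def update (row : String) : String :=
  String.ofList ((PySem.List.pyRange 0 4 1).foldl (fun new_row i =>
    let ci : Char := PySem.List.pyGetD row.toList i ' '
    let cj : Char := PySem.List.pyGetD row.toList (i + 1) ' '
    if (ci = 'B' ∧ cj = 'G') ∨ (cj = 'B' ∧ ci = 'G') then new_row ++ ['R']
    else if (ci = 'R' ∧ cj = 'G') ∨ (cj = 'R' ∧ ci = 'G') then new_row ++ ['B']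
    else if (ci = 'B' ∧ cj = 'R') ∨ (cj = 'B' ∧ ci = 'R') then new_row ++ ['G']
    else new_row ++ [ci]) [])

-- ===== PORT B =====
-- the dict literal of the six distinct color pairs (1-char string values ported as Char)
def combineTable : PySem.Dict (Char × Char) Char :=
  PySem.Dict.ofList [(('B','G'),'R'), (('G','B'),'R'),
                     (('R','G'),'B'), (('G','R'),'B'),
                     (('B','R'),'G'), (('R','B'),'G')]

-- go(i): recursion on remaining steps n, with i = 4 - n (go row n ≙ Python's go(4-n));
-- row[i] / row[i+1]: IndexError excluded by Pre_update, so pyGetD's default is never read.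
def goB (row : List Char) : Nat → List Char
  | 0 => []
  | n+1 =>
    let i := 4 - (n+1)
    (PySem.Dict.getD combineTable (PySem.List.pyGetD row i ' ', PySem.List.pyGetD row (i+1) ' ')
       (PySem.List.pyGetD row i ' ')) :: goB row n

def update_alt (row : String) : String := String.ofList (goB row.toList 4)

-- ===== PRECONDITION & SPEC =====
-- A indexes row[0..4], so it raises IndexError on strings shorter than 5 characters.
def Pre_update (row : String) : Prop := 5 ≤ row.toList.length
instance (row : String) : Decidable (Pre_update row) := by unfold Pre_update; infer_instance
def pvWitness_update : String := "BGRGB"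

def Spec_update (row : String) (out : String) : Prop := out = update_alt row
instance (row : String) (out : String) : Decidable (Spec_update row out) := by unfold Spec_update; infer_instance

-- ===== CLAIM (what is proved, stated in full; the proofs are below) =====
def Claim_equal_update : Prop := ∀ (row : String), Dom_update row → Pre_update row → Spec_update row (update row)

-- ===== LEMMAS AND PROOFS =====

-- A's per-position branch appends exactly B's table lookup, for arbitrary characters.
lemma stepA_eq (nr : List Char) (x y : Char) :
    (if (x = 'B' ∧ y = 'G') ∨ (y = 'B' ∧ x = 'G') then nr ++ ['R']
     else if (x = 'R' ∧ y = 'G') ∨ (y = 'R' ∧ x = 'G') then nr ++ ['B']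
     else if (x = 'B' ∧ y = 'R') ∨ (y = 'B' ∧ x = 'R') then nr ++ ['G']
     else nr ++ [x]) = nr ++ [PySem.Dict.getD combineTable (x, y) x] := by
  by_cases hB : x = 'B' <;> by_cases hR : x = 'R' <;> by_cases hG : x = 'G' <;>
    by_cases kB : y = 'B' <;> by_cases kR : y = 'R' <;> by_cases kG : y = 'G' <;>
    simp_all [combineTable, PySem.Dict.getD, PySem.Dict.ofList, PySem.Dict.get?, PySem.Dict.empty,
              PySem.Dict.update, PySem.Dict.insert, List.find?, beq_iff_eq, Prod.mk.injEq,
              instBEqProd, beq_eq_decide] <;> simp_all [eq_comm]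

-- ===== VERDICT (by name: the statement is the Claim_ definition above) =====
theorem update_spec : Claim_equal_update := by
  intro row _ hpre
  unfold Spec_update
  rcases hl : row.toList with _ | ⟨a, _ | ⟨b, _ | ⟨c, _ | ⟨d, _ | ⟨e, t⟩⟩⟩⟩⟩ <;>
    simp [Pre_update, hl] at hpre
  simp only [update, update_alt, hl]
  rw [show PySem.List.pyRange 0 4 1 = [0,1,2,3] from by decide]
  simp only [List.foldl, stepA_eq, goB]
  simp [PySem.List.pyGetD, PySem.List.pyGet?, PySem.List.pyIdx?]
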